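-- pv_equiv track=rewrite | github.com/pypi-data/pypi-mirror-314 | packages/typing-test-sapien/typing_test_sapien-3.0.2-py3-none-any.whl/typing_test/typing_test.py | colorize_typed
-- ===== SOURCE A (Python) =====
-- def colorize_typed(original, typed):
--     """Colorize the typed words based on correctness."""
--     original_words = original.split()
--     typed_words = typed.split()
--     colored_output = []
--
--     for o, t in zip(original_words, typed_words):
--         if o == t:
--             colored_output.append(f"\033[1;32m{t}\033[0m")  # Green for correct
--         else:
--             colored_output.append(f"\033[1;31m{t}\033[0m")  # Red for incorrect
--
--     # Add remaining words from the typed sentence (if any)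
--     if len(typed_words) > len(original_words):
--         for t in typed_words[len(original_words):]:
--             colored_output.append(f"\033[1;31m{t}\033[0m")  # Extra words in red
--
--     return " ".join(colored_output)
-- ===== SOURCE B (Python) =====
-- def colorize_typed(original, typed):
--     """Colorize the typed words based on correctness."""
--     def walk(orig, typ):
--         # Recursively consume both word lists in lockstep, building the
--         # final string directly (no intermediate list, no join).
--         if not typ:
--             return ""
--         head = typ[0]
--         color = "\033[1;32m" if orig and orig[0] == head else "\033[1;31m"
--         piece = color + head + "\033[0m"
--         rest = walk(orig[1:], typ[1:])
--         return piece if not rest else piece + " " + rest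
--     return walk(original.split(), typed.split())
-- ===== Notes on version B (the rewrite author's own statement) =====
-- stated objective: alternative
-- what changed: Replaces A's accumulator-list loops plus final ' '.join with a single structural recursion over both word lists that builds the output string directly, pairing words positionally and emitting separators on the way.
import Mathlib
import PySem

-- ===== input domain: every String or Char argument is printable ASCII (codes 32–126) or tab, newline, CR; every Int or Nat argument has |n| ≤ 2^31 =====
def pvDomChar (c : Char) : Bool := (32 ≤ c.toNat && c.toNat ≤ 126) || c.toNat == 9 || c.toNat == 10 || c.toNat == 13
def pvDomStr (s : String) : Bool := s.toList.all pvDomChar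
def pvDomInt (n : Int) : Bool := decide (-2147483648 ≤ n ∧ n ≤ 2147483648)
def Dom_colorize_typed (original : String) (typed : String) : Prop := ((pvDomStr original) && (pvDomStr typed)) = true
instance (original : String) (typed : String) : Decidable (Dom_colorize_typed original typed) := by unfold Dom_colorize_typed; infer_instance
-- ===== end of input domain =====

-- B replaces A's accumulator-list loops plus final " ".join with one structural
-- recursion over both word lists that builds the output string directly (objective: alternative).

-- ===== PORT A =====
def colorize_typed (original : String) (typed : String) : String :=
  let original_words := PySem.Str.split₀ original
  let typed_words := PySem.Str.split₀ typed
  let colored_output : List String := []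
  let colored_output := (List.zip original_words typed_words).foldl
    (fun acc p =>
      if p.1 == p.2 then acc ++ ["\x1b[1;32m" ++ p.2 ++ "\x1b[0m"]
      else acc ++ ["\x1b[1;31m" ++ p.2 ++ "\x1b[0m"]) colored_output
  let colored_output :=
    if typed_words.length > original_words.length then
      (PySem.List.slice typed_words (some (original_words.length : Int)) none).foldl
        (fun acc t => acc ++ ["\x1b[1;31m" ++ t ++ "\x1b[0m"]) colored_output
    else colored_output
  PySem.Str.join " " colored_output

-- ===== PORT B =====
-- walk(orig, typ): lockstep recursion, orig[1:] = tail, typ[1:] = tail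
def ctWalk : List String → List String → String
  | _, [] => ""
  | orig, t :: ts =>
    let color := if (!orig.isEmpty) && orig.headI == t then "\x1b[1;32m" else "\x1b[1;31m"
    let piece := color ++ t ++ "\x1b[0m"
    let rest := ctWalk orig.tail ts
    if rest == "" then piece else piece ++ " " ++ rest

def colorize_typed_alt (original : String) (typed : String) : String :=
  ctWalk (PySem.Str.split₀ original) (PySem.Str.split₀ typed)

-- ===== PRECONDITION & SPEC =====
def Spec_colorize_typed (original : String) (typed : String) (out : String) : Prop := out = colorize_typed_alt original typed
instance (original : String) (typed : String) (out : String) : Decidable (Spec_colorize_typed original typed out) := by unfold Spec_colorize_typed; infer_instance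

-- ===== CLAIM (what is proved, stated in full; the proofs are below) =====
def Claim_equal_colorize_typed : Prop := ∀ (original : String) (typed : String), Dom_colorize_typed original typed → Spec_colorize_typed original typed (colorize_typed original typed)

-- ===== LEMMAS AND PROOFS =====

-- list-level counterpart of ctWalk, used only inside the proof
def ctList : List String → List String → List String
  | _, [] => []
  | orig, t :: ts =>
    ((if (!orig.isEmpty) && orig.headI == t then "\x1b[1;32m" else "\x1b[1;31m")
      ++ t ++ "\x1b[0m") :: ctList orig.tail ts

-- each piece is nonempty, so the joined string is empty iff the list is empty
theorem ctWalk_ne_empty (orig : List String) (t : String) (ts : List String) :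
    ctWalk orig (t :: ts) ≠ "" := by
  intro h
  have h2 := congrArg String.toList h
  simp only [ctWalk] at h2
  split at h2 <;> split at h2 <;> simp at h2

-- ctWalk computes the join of ctList
theorem ctWalk_eq_join (orig typ : List String) :
    ctWalk orig typ = PySem.Str.join " " (ctList orig typ) := by
  induction typ generalizing orig with
  | nil => rfl
  | cons t ts ih =>
    simp only [ctWalk, ctList, ih]
    cases ts with
    | nil =>
      apply String.toList_injective
      simp [ctList, PySem.Str.join, PySem.Chars.join_singleton]
    | cons u us =>
      rw [if_neg (by simpa using (ih orig.tail ▸ ctWalk_ne_empty orig.tail u us))]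
      apply String.toList_injective
      simp [ctList, PySem.Str.join, PySem.Chars.join_cons_cons]

-- A's zip-map plus tail-map equals ctList
theorem ctList_eq (typ orig : List String) :
    (List.zip orig typ).map
        (fun p => if p.1 == p.2 then "\x1b[1;32m" ++ p.2 ++ "\x1b[0m"
                  else "\x1b[1;31m" ++ p.2 ++ "\x1b[0m")
      ++ (typ.drop orig.length).map (fun t => "\x1b[1;31m" ++ t ++ "\x1b[0m")
    = ctList orig typ := by
  induction typ generalizing orig with
  | nil => cases orig <;> simp [ctList]
  | cons t ts ih =>
    cases orig with
    | nil =>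
      have h := ih []
      simp only [List.zip_nil_left, List.map_nil, List.length_nil, List.drop_zero,
        List.nil_append] at h
      simp only [List.zip_nil_left, List.map_nil, List.length_nil, List.drop_zero,
        List.map_cons, List.nil_append, ctList, List.tail_nil, ← h]
      simp
    | cons o os =>
      simp only [List.zip_cons_cons, List.map_cons, List.length_cons, List.drop_succ_cons,
        List.cons_append, ctList, List.tail_cons, ih os]
      congr 1
      by_cases h : o = t <;> simp [h]

-- ===== VERDICT (by name: the statement is the Claim_ definition above) =====
theorem colorize_typed_spec : Claim_equal_colorize_typed := by
  intro original typed _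
  unfold Spec_colorize_typed colorize_typed colorize_typed_alt
  have hfun : (fun (acc : List String) (p : String × String) =>
      if p.1 == p.2 then acc ++ ["\x1b[1;32m" ++ p.2 ++ "\x1b[0m"]
      else acc ++ ["\x1b[1;31m" ++ p.2 ++ "\x1b[0m"]) =
    (fun acc p => acc ++ [if p.1 == p.2 then "\x1b[1;32m" ++ p.2 ++ "\x1b[0m"
      else "\x1b[1;31m" ++ p.2 ++ "\x1b[0m"]) := by
    funext acc p; split <;> rfl
  simp only [hfun, PySem.List.foldl_append_singleton_eq_map,
    PySem.List.slice_from_natCast, List.nil_append]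
  rw [ctWalk_eq_join]
  split_ifs with h
  · rw [ctList_eq]
  · rw [← ctList_eq]
    have hnil : List.drop (PySem.Str.split₀ original).length (PySem.Str.split₀ typed) = [] :=
      List.drop_eq_nil_of_le (by omega)
    rw [hnil]
    simp
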